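-- pv_equiv track=rewrite | github.com/AkseliManninen/leetcode | 1732 - Find the Highest Altitude/1732-find-the-highest-altitude.py | largestAltitude
-- ===== SOURCE A (Python) =====
-- def largestAltitude(gain):
--     """
--     :type gain: List[int]
--     :rtype: int
--     """
--
--     highest = 0
--     current = 0
--
--     for i in gain:
--         current += i
--         if current > highest:
--             highest = current
--
--     return highest
-- ===== SOURCE B (Python) =====
-- def largestAltitude(gain):
--     """
--     :type gain: List[int]
--     :rtype: int
--     """
--     alts = [0]
--     for g in gain:
--         alts.append(alts[-1] + g)
--     return max(alts)
-- ===== Notes on version B (the rewrite author's own statement) =====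
-- stated objective: alternative
-- what changed: A's single fused loop (running sum with an in-loop max update) is replaced by two phases: a recursive builder that materializes the whole list of prefix altitudes starting at 0, then a single max() reduction over that list.
import Mathlib
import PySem

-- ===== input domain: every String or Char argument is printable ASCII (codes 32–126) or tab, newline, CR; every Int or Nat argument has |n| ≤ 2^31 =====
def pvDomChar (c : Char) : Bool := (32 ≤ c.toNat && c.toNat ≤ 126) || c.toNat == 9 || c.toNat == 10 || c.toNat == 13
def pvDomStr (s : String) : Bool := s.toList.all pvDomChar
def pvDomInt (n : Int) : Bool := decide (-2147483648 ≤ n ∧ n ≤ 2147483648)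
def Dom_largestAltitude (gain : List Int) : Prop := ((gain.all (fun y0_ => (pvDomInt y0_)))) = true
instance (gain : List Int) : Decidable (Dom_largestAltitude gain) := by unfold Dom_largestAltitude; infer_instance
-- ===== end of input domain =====

-- B builds the full list of prefix altitudes recursively, then takes max; A fuses sum and max in one loop. Proved equal on all inputs.
-- B materializes the full list of prefix altitudes (each step extends the list from its own last element), then takes max() over it; A fuses sum and max in one loop. Proved equal on all inputs.
-- ===== PORT A =====
def largestAltitude (gain : List Int) : Int :=
  (gain.foldl (fun s i =>
      let current := s.2 + i
      let highest := if current > s.1 then current else s.1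
      (highest, current)) (0, 0)).1

-- ===== PORT B =====
def largestAltitude_alt (gain : List Int) : Int :=
  -- alts = [0]; for g in gain: alts.append(alts[-1] + g); return max(alts)
  -- alts is never empty (starts as [0]), so pyGet? and max? never yield none
  (PySem.List.max? (gain.foldl (fun alts g =>
    alts ++ [(PySem.List.pyGet? alts (-1)).getD 0 + g]) [0]) (fun y => y)).getD 0

-- ===== PRECONDITION & SPEC =====
def Spec_largestAltitude (gain : List Int) (out : Int) : Prop := out = largestAltitude_alt gain
instance (gain : List Int) (out : Int) : Decidable (Spec_largestAltitude gain out) := by unfold Spec_largestAltitude; infer_instance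

-- ===== CLAIM (what is proved, stated in full; the proofs are below) =====
def Claim_equal_largestAltitude : Prop := ∀ (gain : List Int), Dom_largestAltitude gain → Spec_largestAltitude gain (largestAltitude gain)

-- ===== LEMMAS AND PROOFS =====

-- proof-side helper: the list of altitudes B builds, as a structural recursion
def pvAlts (c : Int) : List Int → List Int
  | [] => [c]
  | g :: rest => c :: pvAlts (c + g) rest

theorem pvAlts_ne_nil (c : Int) (gs : List Int) : pvAlts c gs ≠ [] := by
  cases gs <;> simp [pvAlts]

-- B's append-loop builds exactly pvAlts
theorem loopB_eq (gs : List Int) : ∀ (pre : List Int) (c : Int),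
    gs.foldl (fun alts g => alts ++ [(PySem.List.pyGet? alts (-1)).getD 0 + g]) (pre ++ [c])
      = pre ++ pvAlts c gs := by
  induction gs with
  | nil => intro pre c; simp [pvAlts]
  | cons g t ih =>
      intro pre c
      simp only [List.foldl_cons, PySem.List.pyGet?_neg_one_append_singleton, Option.getD_some]
      have : (pre ++ [c]) ++ [c + g] = (pre ++ [c]) ++ [c + g] := rfl
      rw [show (pre ++ [c]) ++ [c + g] = (pre ++ [c]) ++ [c + g] from rfl, ih (pre ++ [c]) (c + g)]
      simp [pvAlts]

-- A's fused loop computes the running max of the tail of pvAlts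
theorem loopA_eq (gs : List Int) : ∀ (h c : Int),
    (gs.foldl (fun s i =>
      let current := s.2 + i
      let highest := if current > s.1 then current else s.1
      (highest, current)) (h, c)).1 = (pvAlts c gs).tail.foldl max h := by
  induction gs with
  | nil => intro h c; simp [pvAlts]
  | cons g t ih =>
      intro h c
      simp only [List.foldl_cons, pvAlts, List.tail_cons]
      rw [ih (if c + g > h then c + g else h) (c + g)]
      cases t with
      | nil => simp [pvAlts, max_def]; split_ifs <;> omega
      | cons g' t' =>
          simp only [pvAlts, List.tail_cons, List.foldl_cons]
          congr 1
          rw [max_def]; split_ifs <;> omega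


-- ===== VERDICT (by name: the statement is the Claim_ definition above) =====
theorem largestAltitude_spec : Claim_equal_largestAltitude := by
  intro gain _
  unfold Spec_largestAltitude largestAltitude largestAltitude_alt
  rw [show ([0] : List Int) = [] ++ [0] from rfl, loopB_eq gain [] 0, List.nil_append]
  cases hA : pvAlts 0 gain with
  | nil => exact absurd hA (pvAlts_ne_nil 0 gain)
  | cons a t =>
      have h0 : a = 0 := by cases gain <;> simp [pvAlts] at hA <;> omega
      rw [loopA_eq gain 0 0, hA, PySem.List.max?_id_cons, Option.getD_some, List.tail_cons, h0]
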